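-- pv_equiv track=rewrite | github.com/Josh99bit/AC-Computing | AC Computing/Tutorials/Tutorial 7/Q10.py | star_wars
-- ===== SOURCE A (Python) =====
-- def star_wars(n):
--     result = ""
--     for n in range(1, n+1):
--         if n % 2 == 0:
--             result += "-->"
--         else:
--             result += "->"
--     return result
-- ===== SOURCE B (Python) =====
-- def star_wars(n):
--     m = max(0, n)
--     return "->-->" * (m // 2) + ("->" if m % 2 else "")
-- ===== Notes on version B (the rewrite author's own statement) =====
-- stated objective: simpler
-- what changed: Replaces the per-index loop by a closed form: clamp n at zero, cover the even part of the length by string repetition of the two-arrow unit, and append one short arrow when the length is odd.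
import Mathlib
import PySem

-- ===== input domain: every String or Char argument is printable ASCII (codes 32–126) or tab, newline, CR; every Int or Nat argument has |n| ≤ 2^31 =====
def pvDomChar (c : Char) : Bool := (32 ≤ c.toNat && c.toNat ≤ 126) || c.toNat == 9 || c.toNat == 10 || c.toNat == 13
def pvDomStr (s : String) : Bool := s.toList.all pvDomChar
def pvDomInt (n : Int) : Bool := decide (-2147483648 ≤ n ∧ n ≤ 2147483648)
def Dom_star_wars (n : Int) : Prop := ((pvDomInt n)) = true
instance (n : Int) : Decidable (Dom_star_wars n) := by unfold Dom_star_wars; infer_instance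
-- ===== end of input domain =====

-- B replaces A's per-index loop by a closed form: repeat the unit "->-->" and append "->" for an odd tail (objective: simpler).


-- ===== PORT A =====
-- result = ""; for n in range(1, n+1): result += "-->" if n % 2 == 0 else "->"
def star_wars (n : Int) : String :=
  String.ofList
    ((PySem.List.pyRange 1 (n + 1) 1).foldl
      (fun result k =>
        if PySem.Int.mod k 2 = 0 then result ++ "-->".toList else result ++ "->".toList)
      [])

-- ===== PORT B =====
-- m = max(0, n); return "->-->" * (m // 2) + ("->" if m % 2 else "")
def star_wars_alt (n : Int) : String :=
  let m := max 0 n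
  String.ofList
    (PySem.List.pyRepeat "->-->".toList (PySem.Int.floordiv m 2) ++
      (if PySem.Int.mod m 2 ≠ 0 then "->".toList else []))

-- ===== PRECONDITION & SPEC =====
def Spec_star_wars (n : Int) (out : String) : Prop := out = star_wars_alt n
instance (n : Int) (out : String) : Decidable (Spec_star_wars n out) := by unfold Spec_star_wars; infer_instance

-- ===== CLAIM (what is proved, stated in full; the proofs are below) =====
def Claim_equal_star_wars : Prop := ∀ (n : Int), Dom_star_wars n → Spec_star_wars n (star_wars n)

-- ===== LEMMAS AND PROOFS =====

theorem pv_fdiv2 (k : Nat) : PySem.Int.floordiv (k : Int) 2 = ((k / 2 : Nat) : Int) := by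
  unfold PySem.Int.floordiv
  rw [Int.fdiv_eq_ediv_of_nonneg _ (by positivity)]
  omega

theorem pv_fmod2 (k : Nat) : PySem.Int.mod (k : Int) 2 = ((k % 2 : Nat) : Int) := by
  unfold PySem.Int.mod
  rw [Int.fmod_eq_emod]
  omega

theorem pv_repeat_succ {α : Type} (xs : List α) (m : Nat) :
    PySem.List.pyRepeat xs ((m : Int) + 1) = PySem.List.pyRepeat xs (m : Int) ++ xs := by
  simp [PySem.List.pyRepeat]
  rw [List.replicate_succ', List.flatten_append]
  simp

theorem pv_key (k : Nat) :
    (PySem.List.pyRange 1 ((k : Int) + 1) 1).foldl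
      (fun result j =>
        if PySem.Int.mod j 2 = 0 then result ++ "-->".toList else result ++ "->".toList)
      [] =
    PySem.List.pyRepeat "->-->".toList ((k / 2 : Nat) : Int) ++
      (if k % 2 ≠ 0 then "->".toList else []) := by
  induction k with
  | zero =>
      rw [PySem.List.pyRange_one_eq_nil (by omega)]
      simp [PySem.List.pyRepeat]
  | succ k ih =>
      have hsplit : PySem.List.pyRange 1 ((k : Int) + 1 + 1) 1 =
          PySem.List.pyRange 1 ((k : Int) + 1) 1 ++ [(k : Int) + 1] := by
        have := PySem.List.pyRange_one_succ_right (a := 1) (b := (k : Int) + 1) (by omega)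
        simpa using this
      have hcast : (((k + 1 : Nat) : Int) + 1) = ((k : Int) + 1 + 1) := by push_cast; ring
      rw [hcast, hsplit, List.foldl_append, ih]
      simp only [List.foldl_cons, List.foldl_nil]
      have hmod : PySem.Int.mod ((k : Int) + 1) 2 = ((k + 1) % 2 : Nat) := by
        have := pv_fmod2 (k + 1)
        push_cast at this ⊢
        omega
      rcases Nat.even_or_odd k with he | ho
      · -- k even, so k+1 odd: the new step appends "->"
        obtain ⟨t, ht⟩ := he
        have hk2 : k % 2 = 0 := by omega
        have hk12 : (k + 1) % 2 = 1 := by omega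
        have hdiv : (k + 1) / 2 = k / 2 := by omega
        rw [hmod]
        simp [hk2, hk12, hdiv]
      · -- k odd, so k+1 even: appending "-->" completes one "->-->" unit
        obtain ⟨t, ht⟩ := ho
        have hk2 : k % 2 = 1 := by omega
        have hk12 : (k + 1) % 2 = 0 := by omega
        have hdiv : (k + 1) / 2 = k / 2 + 1 := by omega
        rw [hmod]
        simp only [hk2, hk12, hdiv]
        have := pv_repeat_succ "->-->".toList (k / 2)
        push_cast at this ⊢
        rw [this]
        simp

-- ===== VERDICT (by name: the statement is the Claim_ definition above) =====
theorem star_wars_spec : Claim_equal_star_wars := by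
  intro n _
  unfold Spec_star_wars star_wars star_wars_alt
  by_cases hn : n ≤ 0
  · have hmax : max 0 n = 0 := by omega
    rw [PySem.List.pyRange_one_eq_nil (by omega), hmax]
    simp [PySem.List.pyRepeat, PySem.Int.floordiv, PySem.Int.mod, Int.fmod_eq_emod]
  · have hmax : max 0 n = n := by omega
    have hk : n = ((n.toNat : Nat) : Int) := by omega
    rw [hmax, hk]
    dsimp only
    rw [pv_key n.toNat, pv_fdiv2, pv_fmod2]
    congr 1
    by_cases h : n.toNat % 2 = 0
    · simp [h]
    · simp [h]; omega
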